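-- pv_equiv track=rewrite | github.com/B3nn1E/CSC110 | differences.py | differences
-- ===== SOURCE A (Python) =====
-- def differences (set_1,set_2):
--   common = set_1.intersection(set_2)
--   difference = 0
--   for v in set_1:
--     if v not in common:
--       difference += 1
--   for v in set_2:
--     if v not in common:
--       difference +=1
--   return difference
-- ===== SOURCE B (Python) =====
-- def differences(set_1, set_2):
--     # Sort-and-merge: walk the two sorted element sequences with two pointers,
--     # counting every element that appears in only one of them. Correct because
--     # set elements are distinct, so equal heads pair off exactly once.
--     a = sorted(set_1)
--     b = sorted(set_2)
--     i = j = 0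
--     diff = 0
--     while i < len(a) and j < len(b):
--         if a[i] < b[j]:
--             diff += 1
--             i += 1
--         elif a[i] > b[j]:
--             diff += 1
--             j += 1
--         else:
--             i += 1
--             j += 1
--     return diff + (len(a) - i) + (len(b) - j)
-- ===== Notes on version B (the rewrite author's own statement) =====
-- stated objective: alternative
-- what changed: Replaces A's intersection-set plus two membership-counting loops with a sort-then-two-pointer merge that counts unmatched elements in one linear scan over the sorted sequences.
import Mathlib
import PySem

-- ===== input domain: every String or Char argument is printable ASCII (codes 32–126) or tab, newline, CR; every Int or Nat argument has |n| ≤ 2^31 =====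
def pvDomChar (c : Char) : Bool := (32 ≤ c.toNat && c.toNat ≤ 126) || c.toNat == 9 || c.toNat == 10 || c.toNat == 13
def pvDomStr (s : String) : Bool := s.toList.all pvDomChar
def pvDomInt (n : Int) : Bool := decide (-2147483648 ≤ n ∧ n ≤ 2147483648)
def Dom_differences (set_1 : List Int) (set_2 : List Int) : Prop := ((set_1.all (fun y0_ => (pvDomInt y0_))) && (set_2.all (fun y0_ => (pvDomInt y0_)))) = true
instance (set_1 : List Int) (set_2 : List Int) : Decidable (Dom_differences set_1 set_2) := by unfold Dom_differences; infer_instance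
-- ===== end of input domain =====

-- B replaces A's intersection plus two membership-counting loops with a sort-then-merge
-- two-pointer scan counting unmatched elements (alternative algorithm, similar cost).

-- ===== PORT A =====
def differences (set_1 : List Int) (set_2 : List Int) : Int :=
  let common : PySem.Set Int := PySem.Set.inter (PySem.Set.ofList set_1) set_2
  let difference : Int := set_1.foldl (fun d v => if PySem.Set.contains common v then d else d + 1) 0
  set_2.foldl (fun d v => if PySem.Set.contains common v then d else d + 1) difference

-- ===== PORT B =====
-- B's while loop over indices i, j into the sorted arrays, transcribed as the obvious
-- structural recursion on the two (sorted) suffixes; the trailing tails contribute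
-- their lengths, matching B's `(len(a) - i) + (len(b) - j)` remainder terms.
def twoPtr : List Int → List Int → Int
  | [], b => (b.length : Int)
  | x :: xs, [] => ((x :: xs).length : Int)
  | x :: xs, y :: ys =>
      if x < y then 1 + twoPtr xs (y :: ys)
      else if y < x then 1 + twoPtr (x :: xs) ys
      else twoPtr xs ys

def differences_alt (set_1 : List Int) (set_2 : List Int) : Int :=
  twoPtr (PySem.List.sorted set_1 (fun v => v) false)
         (PySem.List.sorted set_2 (fun v => v) false)

-- ===== PRECONDITION & SPEC =====
-- The parameters are Python sets, so under the type convention their element lists are duplicate-free; Pre_ states just that.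
def Pre_differences (set_1 : List Int) (set_2 : List Int) : Prop := set_1.Nodup ∧ set_2.Nodup
instance (set_1 : List Int) (set_2 : List Int) : Decidable (Pre_differences set_1 set_2) := by unfold Pre_differences; infer_instance
def pvWitness_differences : List Int × List Int := ([1, 2, 3], [2, 4])

def Spec_differences (set_1 : List Int) (set_2 : List Int) (out : Int) : Prop := out = differences_alt set_1 set_2
instance (set_1 : List Int) (set_2 : List Int) (out : Int) : Decidable (Spec_differences set_1 set_2 out) := by unfold Spec_differences; infer_instance

-- ===== CLAIM =====
def Claim_equal_differences : Prop := ∀ (set_1 : List Int) (set_2 : List Int), Dom_differences set_1 set_2 → Pre_differences set_1 set_2 → Spec_differences set_1 set_2 (differences set_1 set_2)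

-- ===== LEMMAS AND PROOFS =====

-- A's counting loop over xs adds the number of elements of xs outside the set c.
lemma foldl_count_not_mem (c : PySem.Set Int) (xs : List Int) (d : Int) :
    xs.foldl (fun d v => if PySem.Set.contains c v then d else d + 1) d
      = d + (xs.countP (fun v => ¬ v ∈ c)) := by
  induction xs generalizing d with
  | nil => simp
  | cons x xs ih =>
      simp only [List.foldl_cons, List.countP_cons, ih]
      by_cases hx : x ∈ c
      · simp [hx]
      · have hc : PySem.Set.contains c x = false := by
          cases h : PySem.Set.contains c x
          · rfl
          · exact absurd ((PySem.Set.contains_iff c x).mp h) hx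
        simp only [hc, decide_not]
        simp [hx]
        ring

-- membership in a cons list ignores a head known to differ
lemma contains_cons_of_ne {x v : Int} {l : List Int} (h : v ≠ x) :
    (x :: l).contains v = l.contains v := by
  simp [List.contains_eq_mem, List.mem_cons, h]

-- On strictly increasing lists, the two-pointer merge counts the elements
-- present in exactly one of the two lists.
lemma twoPtr_eq_counts (a b : List Int) :
    a.Pairwise (· < ·) → b.Pairwise (· < ·) →
    twoPtr a b = (a.countP (fun v => !b.contains v) : Int)
               + (b.countP (fun v => !a.contains v) : Int) := by
  induction a, b using twoPtr.induct with
  | case1 b =>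
      intro _ _
      simp [twoPtr, List.countP_eq_length_filter]
  | case2 x xs =>
      intro _ _
      simp [twoPtr, List.countP_eq_length_filter]
  | case3 x xs y ys h1 ih =>
      intro ha hb
      have hylt : ∀ z ∈ ys, y < z := fun z hz => List.rel_of_pairwise_cons hb hz
      have hxne : ∀ v ∈ y :: ys, v ≠ x := by
        intro v hv
        rcases List.mem_cons.mp hv with rfl | hz
        · exact ne_of_gt h1
        · exact ne_of_gt (h1.trans (hylt v hz))
      have hxnb : (y :: ys).contains x = false := by
        simp only [List.contains_eq_mem, decide_eq_false_iff_not]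
        intro hmem; exact hxne x hmem rfl
      have hcong : (y :: ys).countP (fun v => !(x :: xs).contains v)
          = (y :: ys).countP (fun v => !xs.contains v) := by
        apply List.countP_congr
        intro v hv
        rw [contains_cons_of_ne (hxne v hv)]
      have e1 : (x :: xs).countP (fun v => !(y :: ys).contains v)
          = xs.countP (fun v => !(y :: ys).contains v) + 1 := by
        rw [List.countP_cons, hxnb]
        norm_num
      rw [twoPtr, if_pos h1, ih ha.tail hb, e1, hcong]
      push_cast
      ring
  | case4 x xs y ys h1 h2 ih =>
      intro ha hb
      have hxlt : ∀ z ∈ xs, x < z := fun z hz => List.rel_of_pairwise_cons ha hz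
      have hyne : ∀ v ∈ x :: xs, v ≠ y := by
        intro v hv
        rcases List.mem_cons.mp hv with rfl | hz
        · exact ne_of_gt h2
        · exact ne_of_gt (h2.trans (hxlt v hz))
      have hynb : (x :: xs).contains y = false := by
        simp only [List.contains_eq_mem, decide_eq_false_iff_not]
        intro hmem; exact hyne y hmem rfl
      have hcong : (x :: xs).countP (fun v => !(y :: ys).contains v)
          = (x :: xs).countP (fun v => !ys.contains v) := by
        apply List.countP_congr
        intro v hv
        rw [contains_cons_of_ne (hyne v hv)]
      have e1 : (y :: ys).countP (fun v => !(x :: xs).contains v)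
          = ys.countP (fun v => !(x :: xs).contains v) + 1 := by
        rw [List.countP_cons, hynb]
        norm_num
      rw [twoPtr, if_neg h1, if_pos h2, ih ha hb.tail, e1, hcong]
      push_cast
      ring
  | case5 x xs y ys h1 h2 ih =>
      intro ha hb
      have hxy : x = y := le_antisymm (not_lt.mp h2) (not_lt.mp h1)
      subst hxy
      have hxlt : ∀ z ∈ xs, x < z := fun z hz => List.rel_of_pairwise_cons ha hz
      have hylt : ∀ z ∈ ys, x < z := fun z hz => List.rel_of_pairwise_cons hb hz
      have hx_in : (x :: ys).contains x = true := by simp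
      have hcong1 : xs.countP (fun v => !(x :: ys).contains v)
          = xs.countP (fun v => !ys.contains v) := by
        apply List.countP_congr
        intro v hv
        rw [contains_cons_of_ne (ne_of_gt (hxlt v hv))]
      have hcong2 : ys.countP (fun v => !(x :: xs).contains v)
          = ys.countP (fun v => !xs.contains v) := by
        apply List.countP_congr
        intro v hv
        rw [contains_cons_of_ne (ne_of_gt (hylt v hv))]
      have e1 : (x :: xs).countP (fun v => !(x :: ys).contains v)
          = xs.countP (fun v => !(x :: ys).contains v) := by
        rw [List.countP_cons, hx_in]
        norm_num
      have e2 : (x :: ys).countP (fun v => !(x :: xs).contains v)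
          = ys.countP (fun v => !(x :: xs).contains v) := by
        have hx2 : (x :: xs).contains x = true := by simp
        rw [List.countP_cons, hx2]
        norm_num
      rw [twoPtr, if_neg h1, if_neg h2, ih ha.tail hb.tail, e1, e2, hcong1, hcong2]

-- countP of a non-membership test is permutation-invariant in both arguments.
lemma countP_not_mem_perm {a a' b b' : List Int} (hpa : a.Perm a') (hpb : b.Perm b') :
    a.countP (fun v => !b.contains v) = a'.countP (fun v => !b'.contains v) := by
  rw [hpa.countP_eq]
  apply List.countP_congr
  intro v _
  simp [List.contains_eq_mem, hpb.mem_iff]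

lemma differences_eq (s t : List Int) (hs : s.Nodup) (ht : t.Nodup) :
    differences s t = differences_alt s t := by
  unfold differences differences_alt
  -- name the sorted lists
  set a := PySem.List.sorted s (fun v => v) false with hadef
  set b := PySem.List.sorted t (fun v => v) false with hbdef
  have hpa : a.Perm s := PySem.List.sorted_perm s (fun v => v) false
  have hpb : b.Perm t := PySem.List.sorted_perm t (fun v => v) false
  have hna : a.Pairwise (· < ·) := by
    have hle : a.Pairwise (fun u v => u ≤ v) := PySem.List.sorted_pairwise s (fun v => v)
    have hnd : a.Nodup := hpa.nodup_iff.mpr hs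
    exact hle.imp₂ (fun u v hle hne => lt_of_le_of_ne hle hne) hnd
  have hnb : b.Pairwise (· < ·) := by
    have hle : b.Pairwise (fun u v => u ≤ v) := PySem.List.sorted_pairwise t (fun v => v)
    have hnd : b.Nodup := hpb.nodup_iff.mpr ht
    exact hle.imp₂ (fun u v hle hne => lt_of_le_of_ne hle hne) hnd
  rw [twoPtr_eq_counts a b hna hnb,
      countP_not_mem_perm hpa hpb, countP_not_mem_perm hpb hpa]
  -- now reduce A's loops to the same counts
  simp only [foldl_count_not_mem, zero_add]
  have hs' : s.countP (fun v => ¬ v ∈ PySem.Set.inter (PySem.Set.ofList s) t)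
      = s.countP (fun v => !t.contains v) := by
    apply List.countP_congr
    intro v hv
    simp [PySem.Set.mem_inter, PySem.Set.mem_ofList, hv, List.contains_eq_mem]
  have ht' : t.countP (fun v => ¬ v ∈ PySem.Set.inter (PySem.Set.ofList s) t)
      = t.countP (fun v => !s.contains v) := by
    apply List.countP_congr
    intro v hv
    simp [PySem.Set.mem_inter, PySem.Set.mem_ofList, hv, List.contains_eq_mem]
  rw [hs', ht']

-- ===== VERDICT =====
theorem differences_spec : Claim_equal_differences := by
  intro s t _ hpre
  exact differences_eq s t hpre.1 hpre.2
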